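-- pv_equiv track=rewrite | github.com/erickveg/EnrollEaseProject | schedules/services.py | select_viable_combinations
-- ===== SOURCE A (Python) =====
-- def select_viable_combinations(master_combinations, desired_classes):
--     viable_combinations = []
--
--     # sorted_schedules = sorted(master_combinations, key=lambda x: max(len(schedule) for schedule in x), reverse=True)
--
--     for m in master_combinations:
--         for combination in m:
--             if len(combination) == len(desired_classes):
--                 viable_combinations.append(combination)
--
--     if len(viable_combinations) == 0:
--         for m in master_combinations:
--             for combination in m:
--                 if len(combination) == len(desired_classes) - 1:
--                     viable_combinations.append(combination)
--
--     return viable_combinations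
-- ===== SOURCE B (Python) =====
-- def select_viable_combinations(master_combinations, desired_classes):
--     full = []
--     short = []
--     n = len(desired_classes)
--     for m in master_combinations:
--         for combination in m:
--             l = len(combination)
--             if l == n:
--                 full.append(combination)
--             elif l == n - 1:
--                 short.append(combination)
--     return full if full else short
-- ===== Notes on version B (the rewrite author's own statement) =====
-- stated objective: simpler
-- what changed: One single traversal builds the full-length and one-short lists simultaneously in a pair accumulator, replacing A's two separate conditional re-scans of the whole nested structure.
import Mathlib
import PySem

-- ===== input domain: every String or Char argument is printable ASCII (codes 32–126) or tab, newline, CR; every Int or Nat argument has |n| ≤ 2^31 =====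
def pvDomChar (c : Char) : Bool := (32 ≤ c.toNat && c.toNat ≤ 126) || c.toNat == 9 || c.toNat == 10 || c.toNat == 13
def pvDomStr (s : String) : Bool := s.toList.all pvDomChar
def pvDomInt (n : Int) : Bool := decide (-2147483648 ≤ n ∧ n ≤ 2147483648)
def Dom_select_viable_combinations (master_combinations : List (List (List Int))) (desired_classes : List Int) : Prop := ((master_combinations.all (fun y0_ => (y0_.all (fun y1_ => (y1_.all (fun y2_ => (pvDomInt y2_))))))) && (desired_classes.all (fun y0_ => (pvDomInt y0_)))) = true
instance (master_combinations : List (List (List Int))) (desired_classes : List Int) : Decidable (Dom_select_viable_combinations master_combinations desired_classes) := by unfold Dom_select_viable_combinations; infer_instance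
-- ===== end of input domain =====

-- B replaces A's two full conditional scans by one traversal that builds the
-- full-length and one-short lists simultaneously (objective: simpler, one pass).

-- ===== PORT A =====
-- Literal transliteration: first loop collects length-n combinations; if none
-- were collected, a second full scan collects length-(n-1) combinations.
def select_viable_combinations (master_combinations : List (List (List Int))) (desired_classes : List Int) : List (List Int) :=
  let viable := master_combinations.foldl (fun acc m =>
    m.foldl (fun acc c =>
      if (c.length : Int) = (desired_classes.length : Int) then acc ++ [c] else acc) acc) []
  if viable.length = 0 then
    master_combinations.foldl (fun acc m =>
      m.foldl (fun acc c =>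
        if (c.length : Int) = (desired_classes.length : Int) - 1 then acc ++ [c] else acc) acc) viable
  else viable

-- ===== PORT B =====
-- One pass with a pair accumulator (full, short); return full unless empty.
def select_viable_combinations_alt (master_combinations : List (List (List Int))) (desired_classes : List Int) : List (List Int) :=
  let n : Int := (desired_classes.length : Int)
  let p := master_combinations.foldl (fun p m =>
    m.foldl (fun p c =>
      if (c.length : Int) = n then (p.1 ++ [c], p.2)
      else if (c.length : Int) = n - 1 then (p.1, p.2 ++ [c])
      else p) p) ([], [])
  if p.1.isEmpty then p.2 else p.1

-- ===== PRECONDITION & SPEC =====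
def Spec_select_viable_combinations (master_combinations : List (List (List Int))) (desired_classes : List Int) (out : List (List Int)) : Prop := out = select_viable_combinations_alt master_combinations desired_classes
instance (master_combinations : List (List (List Int))) (desired_classes : List Int) (out : List (List Int)) : Decidable (Spec_select_viable_combinations master_combinations desired_classes out) := by unfold Spec_select_viable_combinations; infer_instance

-- ===== CLAIM (what is proved, stated in full; the proofs are below) =====
def Claim_equal_select_viable_combinations : Prop := ∀ (master_combinations : List (List (List Int))) (desired_classes : List Int), Dom_select_viable_combinations master_combinations desired_classes → Spec_select_viable_combinations master_combinations desired_classes (select_viable_combinations master_combinations desired_classes)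

-- ===== LEMMAS AND PROOFS =====

-- The inner pair-fold over one m splits into the two single-condition folds.
lemma pairFold_inner (n : Int) (m : List (List Int)) (f s : List (List Int)) :
    m.foldl (fun p c =>
      if (c.length : Int) = n then (p.1 ++ [c], p.2)
      else if (c.length : Int) = n - 1 then (p.1, p.2 ++ [c])
      else p) (f, s)
    = (m.foldl (fun acc c => if (c.length : Int) = n then acc ++ [c] else acc) f,
       m.foldl (fun acc c => if (c.length : Int) = n - 1 then acc ++ [c] else acc) s) := by
  induction m generalizing f s with
  | nil => rfl
  | cons c rest ih =>
    simp only [List.foldl]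
    by_cases h1 : (c.length : Int) = n
    · rw [if_pos h1, if_pos h1, if_neg (by omega : ¬ ((c.length : Int) = n - 1)), ih]
    · rw [if_neg h1, if_neg h1]
      by_cases h2 : (c.length : Int) = n - 1
      · rw [if_pos h2, if_pos h2, ih]
      · rw [if_neg h2, if_neg h2, ih]

-- The outer pair-fold splits likewise.
lemma pairFold_outer (n : Int) (mc : List (List (List Int))) (f s : List (List Int)) :
    mc.foldl (fun p m =>
      m.foldl (fun p c =>
        if (c.length : Int) = n then (p.1 ++ [c], p.2)
        else if (c.length : Int) = n - 1 then (p.1, p.2 ++ [c])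
        else p) p) (f, s)
    = (mc.foldl (fun acc m =>
         m.foldl (fun acc c => if (c.length : Int) = n then acc ++ [c] else acc) acc) f,
       mc.foldl (fun acc m =>
         m.foldl (fun acc c => if (c.length : Int) = n - 1 then acc ++ [c] else acc) acc) s) := by
  induction mc generalizing f s with
  | nil => rfl
  | cons m rest ih =>
    simp only [List.foldl]
    rw [pairFold_inner, ih]

-- ===== VERDICT (by name: the statement is the Claim_ definition above) =====
theorem select_viable_combinations_spec : Claim_equal_select_viable_combinations := by
  intro mc dc _
  unfold Spec_select_viable_combinations select_viable_combinations select_viable_combinations_alt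
  simp only [pairFold_outer]
  simp only [List.isEmpty_iff, List.length_eq_zero_iff]
  split_ifs with h
  · rw [h]
  · rfl
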